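-- pv_equiv track=rewrite | github.com/katarinamak/SudokuSolver | implementations/versionC.py | update_possibilities
-- ===== SOURCE A (Python) =====
-- def update_possibilities(possibilities, new_coords, new_val):
--     row, col = new_coords
--     possibilities.pop(new_coords)
--     for k, v in possibilities.items():
--         if row == k[0] or col == k[1] or (row//3 == k[0]//3 and col//3 == k[1]//3):
--            possibilities[k] = v - {new_val}
--
--     possibilities = {k: v for k, v in possibilities.items() if len(v) > 0}
--     return possibilities
-- ===== SOURCE B (Python) =====
-- def update_possibilities(possibilities, new_coords, new_val):
--     # Different strategy: instead of scanning every remaining cell and testing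
--     # the peer predicate on each, build three hash indexes grouping the cells
--     # by row, by column and by box, look up the three buckets of new_coords,
--     # and rewrite exactly those keys.  (Like A, mutates the input dict.)
--     row, col = new_coords
--     possibilities.pop(new_coords)
--     rows, cols, boxes = {}, {}, {}
--     for k in possibilities:
--         rows[k[0]] = rows.get(k[0], []) + [k]
--         cols[k[1]] = cols.get(k[1], []) + [k]
--         b = (k[0] // 3, k[1] // 3)
--         boxes[b] = boxes.get(b, []) + [k]
--     affected = set(rows.get(row, [])) | set(cols.get(col, [])) | set(boxes.get((row // 3, col // 3), []))
--     for k in affected: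
--         possibilities[k] = possibilities[k] - {new_val}
--     return {k: v for k, v in possibilities.items() if v}
-- ===== Notes on version B (the rewrite author's own statement) =====
-- stated objective: alternative
-- what changed: A scans every remaining cell and evaluates the row/column/box peer predicate on each; B instead builds three hash indexes grouping the cells by row, by column and by box in one pass, takes the union of the three buckets of new_coords as the affected key set, and rewrites exactly those keys, so no per-cell peer test is performed.
import Mathlib
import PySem

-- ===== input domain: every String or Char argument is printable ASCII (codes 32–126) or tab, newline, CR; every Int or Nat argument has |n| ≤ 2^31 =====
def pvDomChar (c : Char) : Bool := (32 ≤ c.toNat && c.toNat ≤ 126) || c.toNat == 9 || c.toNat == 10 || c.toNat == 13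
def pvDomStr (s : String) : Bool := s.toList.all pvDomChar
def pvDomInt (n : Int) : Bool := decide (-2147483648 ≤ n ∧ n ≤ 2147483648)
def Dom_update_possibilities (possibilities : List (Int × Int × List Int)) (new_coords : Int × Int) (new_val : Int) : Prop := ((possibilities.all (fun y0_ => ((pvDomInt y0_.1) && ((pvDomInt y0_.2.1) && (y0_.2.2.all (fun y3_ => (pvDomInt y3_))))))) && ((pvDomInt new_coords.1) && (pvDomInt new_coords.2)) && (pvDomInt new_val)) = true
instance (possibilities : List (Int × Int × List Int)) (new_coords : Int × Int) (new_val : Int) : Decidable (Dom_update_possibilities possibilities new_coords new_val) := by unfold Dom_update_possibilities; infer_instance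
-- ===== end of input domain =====

-- B replaces A's scan-with-peer-test by three row/column/box hash indexes whose buckets name
-- the affected keys directly (same return value; like A, the Python B mutates the input dict —
-- the equivalence proved here is about the return value).

-- shared input normalisation: the Python argument is a dict[(int,int), set[int]]
def pvToDict (possibilities : List (Int × Int × List Int)) : PySem.Dict (Int × Int) (List Int) :=
  PySem.Dict.ofList (possibilities.map (fun e => ((e.1, e.2.1), PySem.Set.ofList e.2.2)))

-- the Python peer test 'row == k[0] or col == k[1] or (row//3 == k[0]//3 and col//3 == k[1]//3)'
def pvPeer (row col : Int) (k : Int × Int) : Bool :=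
  row == k.1 || col == k.2 ||
    (PySem.Int.floordiv row 3 == PySem.Int.floordiv k.1 3 &&
     PySem.Int.floordiv col 3 == PySem.Int.floordiv k.2 3)

-- ===== PORT A =====
def update_possibilities (possibilities : List (Int × Int × List Int)) (new_coords : Int × Int) (new_val : Int) : List (Int × Int × List Int) :=
  let row := new_coords.1
  let col := new_coords.2
  -- possibilities.pop(new_coords)  (KeyError when absent: excluded by Pre_)
  let d1 := (pvToDict possibilities).erase new_coords
  -- for k, v in possibilities.items(): if <peer>: possibilities[k] = v - {new_val}
  let d2 := d1.items.foldl (fun d kv =>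
      if pvPeer row col kv.1 then d.insert kv.1 (PySem.Set.diff kv.2 [new_val]) else d) d1
  -- possibilities = {k: v for k, v in possibilities.items() if len(v) > 0}
  (d2.items.filter (fun kv => 0 < kv.2.length)).map (fun kv => (kv.1.1, kv.1.2, kv.2))

-- ===== PORT B =====
def update_possibilities_alt (possibilities : List (Int × Int × List Int)) (new_coords : Int × Int) (new_val : Int) : List (Int × Int × List Int) :=
  let row := new_coords.1
  let col := new_coords.2
  -- possibilities.pop(new_coords)
  let d1 := (pvToDict possibilities).erase new_coords
  -- for k in possibilities: rows[k[0]] = rows.get(k[0], []) + [k]  (and cols, boxes)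
  let rows := d1.keys.foldl (fun d k => d.modify k.1 ([] : List (Int × Int)) (· ++ [k])) PySem.Dict.empty
  let cols := d1.keys.foldl (fun d k => d.modify k.2 ([] : List (Int × Int)) (· ++ [k])) PySem.Dict.empty
  let boxes := d1.keys.foldl (fun d k =>
      d.modify (PySem.Int.floordiv k.1 3, PySem.Int.floordiv k.2 3) ([] : List (Int × Int)) (· ++ [k])) PySem.Dict.empty
  -- affected = set(rows.get(row, [])) | set(cols.get(col, [])) | set(boxes.get(box, []))
  let affected : PySem.Set (Int × Int) :=
    PySem.Set.union (PySem.Set.union (PySem.Set.ofList (rows.getD row [])) (cols.getD col []))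
      (boxes.getD (PySem.Int.floordiv row 3, PySem.Int.floordiv col 3) [])
  -- for k in affected: possibilities[k] = possibilities[k] - {new_val}
  -- (possibilities[k] never raises: every affected key is a key of the dict; getD is exact here)
  let d2 := affected.foldl (fun d k => d.insert k (PySem.Set.diff (d.getD k []) [new_val])) d1
  -- return {k: v for k, v in possibilities.items() if v}
  (d2.items.filter (fun kv => kv.2 ≠ ([] : List Int))).map (fun kv => (kv.1.1, kv.1.2, kv.2))

-- ===== PRECONDITION & SPEC =====
-- Pre_ excludes exactly the inputs where Python A raises KeyError: new_coords not a key of the dict.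
def Pre_update_possibilities (possibilities : List (Int × Int × List Int)) (new_coords : Int × Int) (new_val : Int) : Prop :=
  possibilities.any (fun e => (e.1, e.2.1) == new_coords) = true
instance (possibilities : List (Int × Int × List Int)) (new_coords : Int × Int) (new_val : Int) : Decidable (Pre_update_possibilities possibilities new_coords new_val) := by unfold Pre_update_possibilities; infer_instance

def pvWitness_update_possibilities : (List (Int × Int × List Int)) × (Int × Int) × Int :=
  ([(0, 0, [1, 2]), (0, 1, [2, 3]), (4, 7, [2])], (0, 0), 2)

def Spec_update_possibilities (possibilities : List (Int × Int × List Int)) (new_coords : Int × Int) (new_val : Int) (out : List (Int × Int × List Int)) : Prop := out = update_possibilities_alt possibilities new_coords new_val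
instance (possibilities : List (Int × Int × List Int)) (new_coords : Int × Int) (new_val : Int) (out : List (Int × Int × List Int)) : Decidable (Spec_update_possibilities possibilities new_coords new_val out) := by unfold Spec_update_possibilities; infer_instance

-- ===== CLAIM (what is proved, stated in full; the proofs are below) =====
def Claim_equal_update_possibilities : Prop := ∀ (possibilities : List (Int × Int × List Int)) (new_coords : Int × Int) (new_val : Int), Dom_update_possibilities possibilities new_coords new_val → Pre_update_possibilities possibilities new_coords new_val → Spec_update_possibilities possibilities new_coords new_val (update_possibilities possibilities new_coords new_val)

-- ===== LEMMAS AND PROOFS =====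

-- the per-entry update A's loop performs on each peer entry
def pvUpd (row col new_val : Int) (kv : (Int × Int) × List Int) : (Int × Int) × List Int :=
  (kv.1, if pvPeer row col kv.1 then PySem.Set.diff kv.2 [new_val] else kv.2)

-- A's loop over the dict's own items rewrites each entry in place
lemma itemsA (row col new_val : Int) :
    ∀ (l pre : List ((Int × Int) × List Int)) (e : PySem.Dict (Int × Int) (List Int)),
      e.items = pre ++ l → (e.items.map Prod.fst).Nodup →
      (l.foldl (fun d kv =>
          if pvPeer row col kv.1 then d.insert kv.1 (PySem.Set.diff kv.2 [new_val]) else d) e).items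
        = pre ++ l.map (pvUpd row col new_val) := by
  intro l
  induction l with
  | nil => intro pre e h _; simpa using h
  | cons kv t ih =>
    intro pre e h hnd
    have hnd' := hnd
    rw [h] at hnd'
    simp only [List.map_append, List.map_cons, List.nodup_append, List.nodup_cons] at hnd'
    have hnotpre : ∀ q ∈ pre, q.1 ≠ kv.1 := by
      intro q hq hqk
      exact hnd'.2.2 q.1 (List.mem_map_of_mem hq) kv.1 (List.mem_cons_self ..) hqk
    have hnott : kv.1 ∉ t.map Prod.fst := hnd'.2.1.1
    simp only [List.foldl_cons, List.map_cons]
    by_cases hp : pvPeer row col kv.1 = true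
    · have hc : e.contains kv.1 = true := by
        rw [PySem.Dict.contains_iff_mem_keys]
        show kv.1 ∈ e.items.map (fun x => x.1)
        rw [h]
        exact List.mem_map_of_mem (by simp)
      have hit : (e.insert kv.1 (PySem.Set.diff kv.2 [new_val])).items
          = (pre ++ [(kv.1, PySem.Set.diff kv.2 [new_val])]) ++ t := by
        rw [PySem.Dict.items_insert_of_contains e _ hc, h]
        rw [List.map_append, List.map_cons]
        have hpre : pre.map (fun p => if (p.1 == kv.1) = true
            then (kv.1, PySem.Set.diff kv.2 [new_val]) else p) = pre := by
          rw [List.map_congr_left (g := id) (fun q hq => by simp [hnotpre q hq])]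
          simp
        have ht : t.map (fun p => if (p.1 == kv.1) = true
            then (kv.1, PySem.Set.diff kv.2 [new_val]) else p) = t := by
          rw [List.map_congr_left (g := id) (fun q hq => by
            have hne : q.1 ≠ kv.1 := fun hqk => hnott (by rw [← hqk]; exact List.mem_map_of_mem hq)
            simp [hne])]
          simp
        rw [hpre, ht]
        simp
      have hndE : ((e.insert kv.1 (PySem.Set.diff kv.2 [new_val])).items.map Prod.fst).Nodup := by
        rw [hit]
        rw [h] at hnd
        simpa using hnd
      rw [if_pos hp]
      rw [ih (pre ++ [(kv.1, PySem.Set.diff kv.2 [new_val])]) _ (by rw [hit]) hndE]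
      simp [pvUpd, hp]
    · rw [if_neg hp]
      rw [ih (pre ++ [kv]) e (by rw [h]; simp) hnd]
      simp [pvUpd, hp]

lemma nodup_keys_d1 (possibilities : List (Int × Int × List Int)) (new_coords : Int × Int) :
    (((pvToDict possibilities).erase new_coords).items.map Prod.fst).Nodup := by
  have h0 : ((pvToDict possibilities).items.map Prod.fst).Nodup := by
    have := PySem.Dict.nodup_keys_ofList
      (possibilities.map (fun e => ((e.1, e.2.1), PySem.Set.ofList e.2.2)))
    simpa [pvToDict, PySem.Dict.keys] using this
  have hsub : (((pvToDict possibilities).erase new_coords).items.map Prod.fst).Sublist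
      ((pvToDict possibilities).items.map Prod.fst) := by
    simp only [PySem.Dict.erase]
    exact List.Sublist.map Prod.fst List.filter_sublist
  exact h0.sublist hsub

-- a bucket of the grouping loop holds exactly the keys with that group value
lemma bucket_getD {γ : Type} [BEq γ] [LawfulBEq γ] (g : (Int × Int) → γ) (c : γ)
    (ks : List (Int × Int)) :
    (ks.foldl (fun d k => d.modify (g k) ([] : List (Int × Int)) (· ++ [k])) PySem.Dict.empty).getD c []
      = ks.filter (fun k => g k == c) := by
  have h : ks.foldl (fun d k => d.modify (g k) ([] : List (Int × Int)) (· ++ [k])) PySem.Dict.empty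
      = (ks.map (fun k => (g k, k))).foldl (fun d p => d.modify p.1 [] (· ++ [p.2])) PySem.Dict.empty := by
    rw [List.foldl_map]
  rw [h, PySem.Dict.getD_foldl_modify_append]
  simp [List.filter_map, Function.comp_def]

-- B's mutation loop over a duplicate-free list of existing keys, described entrywise
lemma itemsB (new_val : Int) :
    ∀ (aff : List (Int × Int)) (d : PySem.Dict (Int × Int) (List Int)),
      aff.Nodup → (d.items.map Prod.fst).Nodup → (∀ k ∈ aff, d.contains k = true) →
      (aff.foldl (fun d k => d.insert k (PySem.Set.diff (d.getD k []) [new_val])) d).items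
        = d.items.map (fun kv => if kv.1 ∈ aff then (kv.1, PySem.Set.diff kv.2 [new_val]) else kv) := by
  intro aff
  induction aff with
  | nil => intro d _ _ _; simp
  | cons a t ih =>
    intro d hnd hkeys hmem
    simp only [List.nodup_cons] at hnd
    simp only [List.foldl_cons]
    have hc : d.contains a = true := hmem a (List.mem_cons_self ..)
    have hstep : (d.insert a (PySem.Set.diff (d.getD a []) [new_val])).items
        = d.items.map (fun kv => if kv.1 == a then (kv.1, PySem.Set.diff kv.2 [new_val]) else kv) := by
      rw [PySem.Dict.items_insert_of_contains d _ hc]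
      apply List.map_congr_left
      intro p hp
      by_cases hpa : (p.1 == a) = true
      · have ha : a = p.1 := (eq_of_beq hpa).symm
        have hget : d.getD p.1 [] = p.2 := by
          refine PySem.Dict.getD_of_mem_items (d := d) ?_ ?_ ([])
          · exact hp
          · simpa [PySem.Dict.keys] using hkeys
        simp [← ha, ha ▸ hget]
      · simp [hpa]
    have hfst : ((d.insert a (PySem.Set.diff (d.getD a []) [new_val])).items.map Prod.fst)
        = d.items.map Prod.fst := by
      rw [hstep, List.map_map]
      have : (Prod.fst ∘ fun kv : (Int × Int) × List Int =>
          if kv.1 == a then (kv.1, PySem.Set.diff kv.2 [new_val]) else kv) = Prod.fst := by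
        funext kv; by_cases h : kv.1 = a <;> simp [h]
      rw [this]
    have hkeys' : ((d.insert a (PySem.Set.diff (d.getD a []) [new_val])).items.map Prod.fst).Nodup := by
      rw [hfst]; exact hkeys
    have hmem' : ∀ k ∈ t, (d.insert a (PySem.Set.diff (d.getD a []) [new_val])).contains k = true := by
      intro k hk
      have h2 := hmem k (List.mem_cons_of_mem _ hk)
      rw [PySem.Dict.contains_iff_mem_keys] at h2 ⊢
      have hkeq : (d.insert a (PySem.Set.diff (d.getD a []) [new_val])).keys = d.keys := by
        simpa [PySem.Dict.keys] using hfst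
      rw [hkeq]; exact h2
    rw [ih _ hnd.2 hkeys' hmem', hstep, List.map_map]
    apply List.map_congr_left
    intro kv _
    by_cases hka : (kv.1 == a) = true
    · have h1 : kv.1 = a := eq_of_beq hka
      have hnt : kv.1 ∉ t := h1 ▸ hnd.1
      simp [h1, hnd.1]
    · have h1 : kv.1 ≠ a := by simpa using hka
      by_cases hkt : kv.1 ∈ t <;> simp [hkt, h1]

-- B's whole pipeline after the pop: the three bucket lookups name exactly the peer keys,
-- so the mutation loop rewrites the same entries A's scan rewrites
lemma itemsB_main (row col new_val : Int) (d1 : PySem.Dict (Int × Int) (List Int))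
    (hnd : (d1.items.map Prod.fst).Nodup) :
    ((PySem.Set.union (PySem.Set.union (PySem.Set.ofList
        ((d1.keys.foldl (fun d k => d.modify k.1 ([] : List (Int × Int)) (· ++ [k])) PySem.Dict.empty).getD row []))
        ((d1.keys.foldl (fun d k => d.modify k.2 ([] : List (Int × Int)) (· ++ [k])) PySem.Dict.empty).getD col []))
        ((d1.keys.foldl (fun d k =>
            d.modify (PySem.Int.floordiv k.1 3, PySem.Int.floordiv k.2 3) ([] : List (Int × Int)) (· ++ [k]))
          PySem.Dict.empty).getD (PySem.Int.floordiv row 3, PySem.Int.floordiv col 3) [])).foldl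
      (fun d k => d.insert k (PySem.Set.diff (d.getD k []) [new_val])) d1).items
    = d1.items.map (pvUpd row col new_val) := by
  have hb1 := bucket_getD (fun k : Int × Int => k.1) row d1.keys
  have hb2 := bucket_getD (fun k : Int × Int => k.2) col d1.keys
  have hb3 := bucket_getD (fun k : Int × Int => (PySem.Int.floordiv k.1 3, PySem.Int.floordiv k.2 3))
    (PySem.Int.floordiv row 3, PySem.Int.floordiv col 3) d1.keys
  rw [hb1, hb2, hb3]
  have hmemaff : ∀ k, k ∈ PySem.Set.union (PySem.Set.union
        (PySem.Set.ofList (d1.keys.filter (fun k : Int × Int => k.1 == row)))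
        (d1.keys.filter (fun k : Int × Int => k.2 == col)))
        (d1.keys.filter (fun k : Int × Int =>
          (PySem.Int.floordiv k.1 3, PySem.Int.floordiv k.2 3)
            == (PySem.Int.floordiv row 3, PySem.Int.floordiv col 3)))
      ↔ k ∈ d1.keys ∧ pvPeer row col k = true := by
    intro k
    simp only [PySem.Set.mem_union, PySem.Set.mem_ofList, List.mem_filter, pvPeer,
      Bool.or_eq_true, Bool.and_eq_true, beq_iff_eq, Prod.mk.injEq]
    constructor
    · rintro ((⟨hk, h⟩ | ⟨hk, h⟩) | ⟨hk, h⟩) <;> exact ⟨hk, by tauto⟩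
    · rintro ⟨hk, (h | h) | h⟩
      · exact Or.inl (Or.inl ⟨hk, h.symm⟩)
      · exact Or.inl (Or.inr ⟨hk, h.symm⟩)
      · exact Or.inr ⟨hk, h.1.symm, h.2.symm⟩
  have hndaff : (PySem.Set.union (PySem.Set.union
        (PySem.Set.ofList (d1.keys.filter (fun k : Int × Int => k.1 == row)))
        (d1.keys.filter (fun k : Int × Int => k.2 == col)))
        (d1.keys.filter (fun k : Int × Int =>
          (PySem.Int.floordiv k.1 3, PySem.Int.floordiv k.2 3)
            == (PySem.Int.floordiv row 3, PySem.Int.floordiv col 3)))).Nodup :=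
    PySem.Set.nodup_union _ _ (PySem.Set.nodup_union _ _ (PySem.Set.nodup_ofList _))
  rw [itemsB new_val _ d1 hndaff hnd (fun k hk => by
    rw [PySem.Dict.contains_iff_mem_keys]
    exact ((hmemaff k).mp hk).1)]
  apply List.map_congr_left
  intro kv hkv
  have hk : kv.1 ∈ d1.keys := PySem.Dict.mem_keys_of_mem_items _ hkv
  by_cases hp : pvPeer row col kv.1 = true
  · rw [if_pos ((hmemaff kv.1).mpr ⟨hk, hp⟩)]
    simp [pvUpd, hp]
  · rw [if_neg (fun hmem => hp ((hmemaff kv.1).mp hmem).2)]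
    simp [pvUpd, hp]

-- ===== VERDICT (by name: the statement is the Claim_ definition above) =====
theorem update_possibilities_spec : Claim_equal_update_possibilities := by
  intro possibilities new_coords new_val _ _
  unfold Spec_update_possibilities update_possibilities update_possibilities_alt
  have hnd := nodup_keys_d1 possibilities new_coords
  have hA := itemsA new_coords.1 new_coords.2 new_val
    ((pvToDict possibilities).erase new_coords).items []
    ((pvToDict possibilities).erase new_coords) rfl hnd
  have hB := itemsB_main new_coords.1 new_coords.2 new_val
    ((pvToDict possibilities).erase new_coords) hnd
  simp only [List.nil_append] at hA
  simp only [hA, hB]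
  apply congrArg
  apply List.filter_congr
  intro kv _
  simp [List.length_pos_iff]
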